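-- pv_equiv track=rewrite | github.com/LH99Tw/2025_AlphaLaboratory | alphas/providers/qlib.py | _translate_expression
-- ===== SOURCE A (Python) =====
-- def _translate_expression(expression: str) -> str:
--     replacements = {
--         "$close": "close",
--         "$open": "open",
--         "$high": "high",
--         "$low": "low",
--         "$vwap": "vwap",
--         "$volume": "volume",
--     }
--     translated = expression
--     for source, target in replacements.items():
--         translated = translated.replace(source, target)
--     return translated
-- ===== SOURCE B (Python) =====
-- def _translate_expression(expression: str) -> str:
--     fields = ("close", "open", "high", "low", "vwap", "volume")
--     out = []
--     i = 0
--     n = len(expression)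
--     while i < n:
--         if expression[i] == "$":
--             for field in fields:
--                 if expression.startswith(field, i + 1):
--                     out.append(field)
--                     i += 1 + len(field)
--                     break
--             else:
--                 out.append("$")
--                 i += 1
--         else:
--             out.append(expression[i])
--             i += 1
--     return "".join(out)
-- ===== Notes on version B (the rewrite author's own statement) =====
-- stated objective: alternative
-- what changed: Replaces the six sequential whole-string str.replace passes with a single left-to-right scan that at each dollar sign tries the six field names once and copies everything else through, building the output in one pass.
import Mathlib
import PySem

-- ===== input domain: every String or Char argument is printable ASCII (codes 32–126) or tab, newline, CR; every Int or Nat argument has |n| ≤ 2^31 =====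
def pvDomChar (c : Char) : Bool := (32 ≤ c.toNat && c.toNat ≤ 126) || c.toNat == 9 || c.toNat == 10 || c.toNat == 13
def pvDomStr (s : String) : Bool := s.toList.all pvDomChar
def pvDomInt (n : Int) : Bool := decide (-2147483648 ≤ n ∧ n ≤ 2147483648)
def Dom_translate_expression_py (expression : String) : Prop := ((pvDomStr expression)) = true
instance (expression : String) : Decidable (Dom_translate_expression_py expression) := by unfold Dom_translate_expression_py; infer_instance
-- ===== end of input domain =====

-- B replaces A's six sequential whole-string str.replace passes by one left-to-right scan
-- that at each dollar sign tries the six field names once (alternative single-pass algorithm; not measured faster).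

-- ===== PORT A =====
-- literal transliteration of the six-iteration replace loop (dict iteration order = insertion order)
def translate_expression_py (expression : String) : String :=
  let translated := expression
  let translated := PySem.Str.replace translated "$close" "close"
  let translated := PySem.Str.replace translated "$open" "open"
  let translated := PySem.Str.replace translated "$high" "high"
  let translated := PySem.Str.replace translated "$low" "low"
  let translated := PySem.Str.replace translated "$vwap" "vwap"
  let translated := PySem.Str.replace translated "$volume" "volume"
  translated

-- ===== PORT B =====
-- the fields tuple of Source B
def pvFields : List (List Char) := ["close".toList, "open".toList, "high".toList, "low".toList, "vwap".toList, "volume".toList]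

-- the inner `for field in fields: if expression.startswith(field, i + 1)` loop of Source B
def pvTryField (t : List Char) : Option (List Char) :=
  pvFields.find? (fun f => f.isPrefixOf t)

-- the `while i < n` scan of Source B, with the rest of the string standing for position i;
-- the `out` pieces appended by Source B are emitted by direct concatenation (= ''.join(out))
def pvScan (l : List Char) : List Char :=
  match l with
  | [] => []
  | c :: t =>
    if c = '$' then
      match pvTryField t with
      | some f => f ++ pvScan (t.drop f.length)
      | none => '$' :: pvScan t
    else c :: pvScan t
termination_by l.length
decreasing_by
  all_goals simp only [List.length_drop, List.length_cons]; omega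

def translate_expression_py_alt (expression : String) : String :=
  String.ofList (pvScan expression.toList)

-- ===== PRECONDITION & SPEC =====
def Spec_translate_expression_py (expression : String) (out : String) : Prop := out = translate_expression_py_alt expression
instance (expression : String) (out : String) : Decidable (Spec_translate_expression_py expression out) := by unfold Spec_translate_expression_py; infer_instance

-- ===== CLAIM (what is proved, stated in full; the proofs are below) =====
def Claim_equal_translate_expression_py : Prop := ∀ (expression : String), Dom_translate_expression_py expression → Spec_translate_expression_py expression (translate_expression_py expression)

-- ===== LEMMAS AND PROOFS =====

-- `replace l ('$' :: w) w` — the list-level view of one `str.replace` pass of A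
def pvR (w : List Char) (l : List Char) : List Char := PySem.Chars.replace l ('$' :: w) w

-- A's loop as a fold over the list of field words
def pvChain (ws : List (List Char)) (l : List Char) : List Char := ws.foldl (fun s w => pvR w s) l

-- fuel-free reference recursion for PySem.Chars.replace.go
def pvReplF (old new : List Char) : Nat → List Char → List Char
  | 0, l => l
  | _ + 1, [] => []
  | fuel + 1, c :: t =>
    if old.isPrefixOf (c :: t) then new ++ pvReplF old new fuel ((c :: t).drop old.length)
    else c :: pvReplF old new fuel t

theorem pvGo_eq_replF (old new : List Char) :
    ∀ fuel l acc, PySem.Chars.replace.go old new fuel l acc = acc.reverse ++ pvReplF old new fuel l := by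
  intro fuel
  induction fuel with
  | zero => intro l acc; simp [PySem.Chars.replace.go, pvReplF]
  | succ n ih =>
    intro l acc
    cases l with
    | nil => simp [PySem.Chars.replace.go, pvReplF]
    | cons c t =>
      by_cases h : old.isPrefixOf (c :: t)
      · simp [PySem.Chars.replace.go, pvReplF, h, ih]
      · simp [PySem.Chars.replace.go, pvReplF, h, ih]

theorem pvReplF_fuel (old new : List Char) (hold : old ≠ []) :
    ∀ fuel fuel' l, l.length ≤ fuel → l.length ≤ fuel' →
      pvReplF old new fuel l = pvReplF old new fuel' l := by
  have ho : 0 < old.length := List.length_pos_iff.mpr hold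
  intro fuel
  induction fuel with
  | zero =>
    intro fuel' l h1 _
    have : l = [] := List.length_eq_zero_iff.mp (Nat.le_zero.mp h1)
    subst this
    cases fuel' <;> simp [pvReplF]
  | succ n ih =>
    intro fuel' l h1 h2
    cases l with
    | nil => cases fuel' <;> simp [pvReplF]
    | cons c t =>
      cases fuel' with
      | zero => simp at h2
      | succ m =>
        simp only [List.length_cons] at h1 h2
        by_cases h : old.isPrefixOf (c :: t)
        · simp only [pvReplF, h, if_pos]
          rw [ih m (List.drop old.length (c :: t))
                (by simp only [List.length_drop, List.length_cons]; omega)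
                (by simp only [List.length_drop, List.length_cons]; omega)]
        · simp only [pvReplF, h, Bool.false_eq_true, if_false]
          rw [ih m t (by omega) (by omega)]

theorem pvR_eq_replF (w l : List Char) : pvR w l = pvReplF ('$' :: w) w l.length l := by
  simp [pvR, PySem.Chars.replace, pvGo_eq_replF]

-- L1
theorem pvR_nil (w : List Char) : pvR w [] = [] := by
  simp [pvR_eq_replF, pvReplF]

-- L2: a match at the head
theorem pvR_match (w l : List Char) (h : ('$' :: w) <+: l) :
    pvR w l = w ++ pvR w (l.drop ('$' :: w).length) := by
  cases l with
  | nil => rcases h with ⟨m, hm⟩; simp at hm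
  | cons c t =>
    rw [pvR_eq_replF, pvR_eq_replF]
    have hpf : ('$' :: w).isPrefixOf (c :: t) := List.isPrefixOf_iff_prefix.mpr h
    simp only [List.length_cons, pvReplF, hpf, if_pos]
    congr 1
    exact pvReplF_fuel _ _ (by simp) _ _ _
      (by simp only [List.length_drop, List.length_cons]; omega) (le_refl _)

-- L3: no match at the head
theorem pvR_nomatch (w : List Char) (c : Char) (t : List Char) (h : ¬ ('$' :: w) <+: (c :: t)) :
    pvR w (c :: t) = c :: pvR w t := by
  rw [pvR_eq_replF, pvR_eq_replF]
  have hpf : ¬ ('$' :: w).isPrefixOf (c :: t) := fun hc => h (List.isPrefixOf_iff_prefix.mp hc)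
  simp only [List.length_cons, pvReplF, hpf, Bool.false_eq_true, if_false]

-- T1: a '$'-free prefix passes through one replace pass untouched
theorem pvR_append (w s x : List Char) (hs : '$' ∉ s) : pvR w (s ++ x) = s ++ pvR w x := by
  induction s with
  | nil => rfl
  | cons a s ih =>
    have ha : a ≠ '$' := by intro h; exact hs (h ▸ List.mem_cons_self)
    have : ¬ ('$' :: w) <+: (a :: (s ++ x)) := by
      intro h; rw [List.cons_prefix_cons] at h; exact ha h.1.symm
    rw [List.cons_append, pvR_nomatch _ _ _ this, ih (fun h => hs (List.mem_cons_of_mem _ h)),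
      List.cons_append]

theorem pv_prefix_append_cases {v a x : List Char} (h : v <+: a ++ x) : v <+: a ∨ a <+: v := by
  by_cases hl : v.length ≤ a.length
  · exact Or.inl (List.prefix_of_prefix_length_le h (List.prefix_append a x) hl)
  · exact Or.inr (List.prefix_of_prefix_length_le (List.prefix_append a x) h (by omega))

-- "v could only become a prefix through pass w": junction relation (Bool so that `decide` applies)
def pvJ (w v : List Char) : Bool :=
  v.tails.any fun u => (!u.isEmpty && u.isPrefixOf w) || w.isPrefixOf u

theorem pvJ_iff (w v : List Char) :
    pvJ w v = true ↔ ((∃ u ∈ v.tails, u ≠ [] ∧ u <+: w) ∨ w <:+: v) := by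
  simp only [pvJ, List.any_eq_true, List.mem_tails, Bool.or_eq_true, Bool.and_eq_true,
    List.isPrefixOf_iff_prefix, List.infix_iff_prefix_suffix]
  constructor
  · rintro ⟨u, hu, ⟨hne, hp⟩ | hp⟩
    · exact Or.inl ⟨u, hu, by simpa [List.isEmpty_iff] using hne, hp⟩
    · exact Or.inr ⟨u, hp, hu⟩
  · rintro (⟨u, hu, hne, hp⟩ | ⟨u, hp, hu⟩)
    · exact ⟨u, hu, Or.inl ⟨by simpa [List.isEmpty_iff] using hne, hp⟩⟩
    · exact ⟨u, hu, Or.inr hp⟩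

theorem pvJ_cons (w v : List Char) (c : Char) (h : pvJ w v = true) : pvJ w (c :: v) = true := by
  rw [pvJ_iff] at h ⊢
  rcases h with ⟨u, hu, hne, hpre⟩ | hinf
  · exact Or.inl ⟨u, by
      rw [List.mem_tails] at hu ⊢
      exact hu.trans (List.suffix_cons c v), hne, hpre⟩
  · exact Or.inr (List.infix_cons hinf)

-- HS1: one replace pass creates a new head occurrence only via a junction
theorem pvHS1 (w : List Char) :
    ∀ n (t : List Char), t.length ≤ n → ∀ v, v <+: pvR w t → v <+: t ∨ pvJ w v = true := by
  intro n
  induction n with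
  | zero =>
    intro t ht v hv
    have : t = [] := List.length_eq_zero_iff.mp (Nat.le_zero.mp ht)
    subst this
    rw [pvR_nil] at hv
    exact Or.inl (List.prefix_nil.mp hv ▸ List.nil_prefix)
  | succ n ih =>
    intro t ht v hv
    by_cases hp : ('$' :: w) <+: t
    · obtain ⟨m, rfl⟩ := hp
      rw [pvR_match _ _ (List.prefix_append _ m), List.drop_left] at hv
      rcases pv_prefix_append_cases hv with hc | hc
      · cases v with
        | nil => exact Or.inl (List.nil_prefix)
        | cons d v' =>
          exact Or.inr ((pvJ_iff _ _).mpr (Or.inl ⟨d :: v',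
            (List.mem_tails _ _).mpr List.suffix_rfl, List.cons_ne_nil d v', hc⟩))
      · exact Or.inr ((pvJ_iff _ _).mpr (Or.inr hc.isInfix))
    · cases t with
      | nil =>
        rw [pvR_nil] at hv
        exact Or.inl (List.prefix_nil.mp hv ▸ List.nil_prefix)
      | cons c t' =>
        rw [pvR_nomatch _ _ _ hp] at hv
        cases v with
        | nil => exact Or.inl List.nil_prefix
        | cons d v' =>
          rw [List.cons_prefix_cons] at hv
          rcases ih t' (by simp at ht; omega) v' hv.2 with h | h
          · exact Or.inl (List.cons_prefix_cons.mpr ⟨hv.1, h⟩)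
          · exact Or.inr (hv.1 ▸ pvJ_cons w v' d h)

-- pvChain: basic lemmas
theorem pvChain_cons (w : List Char) (ws : List (List Char)) (l : List Char) :
    pvChain (w :: ws) l = pvChain ws (pvR w l) := rfl

theorem pvChain_nil (ws : List (List Char)) : pvChain ws [] = [] := by
  induction ws with
  | nil => rfl
  | cons w ws ih => rw [pvChain_cons, pvR_nil]; exact ih

theorem pvChain_append (ws : List (List Char)) (s x : List Char) (hs : '$' ∉ s) :
    pvChain ws (s ++ x) = s ++ pvChain ws x := by
  induction ws generalizing x with
  | nil => rfl
  | cons w ws ih =>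
    rw [pvChain_cons, pvChain_cons, pvR_append _ _ _ hs, ih]

-- G2: no field matches after the '$' — the '$' survives every pass
theorem pvChain_dollar_nomatch (ws : List (List Char))
    (hws : ∀ w ∈ ws, '$' ∉ w ∧ w ≠ [])
    (hpw : List.Pairwise (fun a b => pvJ a b = false) ws) :
    ∀ t, (∀ w ∈ ws, ¬ w <+: t) → pvChain ws ('$' :: t) = '$' :: pvChain ws t := by
  induction ws with
  | nil => intro t _; rfl
  | cons w ws ih =>
    intro t hnp
    have hhead : ¬ ('$' :: w) <+: ('$' :: t) := by
      intro h; rw [List.cons_prefix_cons] at h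
      exact hnp w List.mem_cons_self h.2
    rw [pvChain_cons, pvChain_cons, pvR_nomatch _ _ _ hhead]
    have hws' : ∀ w' ∈ ws, '$' ∉ w' ∧ w' ≠ [] := fun w' h => hws w' (List.mem_cons_of_mem _ h)
    have : ∀ w' ∈ ws, ¬ w' <+: pvR w t := by
      intro w' hmem hpre
      rcases pvHS1 w t.length t (le_refl _) w' hpre with h | h
      · exact hnp w' (List.mem_cons_of_mem _ hmem) h
      · exact absurd h (by simp [List.rel_of_pairwise_cons hpw hmem])
    exact ih hws' hpw.of_cons _ this

-- G1: the matching field is replaced, everything else passes through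
theorem pvChain_dollar_match (ws₁ : List (List Char)) (w : List Char) (ws₂ : List (List Char))
    (hws : ∀ w' ∈ (ws₁ ++ w :: ws₂), '$' ∉ w' ∧ w' ≠ [])
    (h₁ : ∀ w' ∈ ws₁, ¬ w' <+: w ∧ ¬ w <+: w') :
    ∀ m, pvChain (ws₁ ++ w :: ws₂) ('$' :: (w ++ m)) = w ++ pvChain (ws₁ ++ w :: ws₂) m := by
  induction ws₁ with
  | nil =>
    intro m
    have hw := hws w (by simp)
    have hmatch : ('$' :: w) <+: ('$' :: (w ++ m)) := by
      rw [List.cons_prefix_cons]; exact ⟨rfl, List.prefix_append w m⟩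
    have hdrop : (('$' :: (w ++ m)).drop ('$' :: w).length) = m := by
      have h2 : ('$' :: (w ++ m)) = ('$' :: w) ++ m := by simp
      rw [h2, List.drop_left]
    rw [List.nil_append, pvChain_cons, pvChain_cons, pvR_match _ _ hmatch, hdrop,
      pvChain_append _ _ _ hw.1]
  | cons w' ws₁ ih =>
    intro m
    have hw' := hws w' (by simp)
    have hnm : ¬ ('$' :: w') <+: ('$' :: (w ++ m)) := by
      intro h; rw [List.cons_prefix_cons] at h
      rcases pv_prefix_append_cases h.2 with hc | hc
      · exact (h₁ w' List.mem_cons_self).1 hc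
      · exact (h₁ w' List.mem_cons_self).2 hc
    rw [List.cons_append, pvChain_cons, pvChain_cons, pvR_nomatch _ _ _ hnm,
      pvR_append w' w m (hws w (by simp)).1]
    have hws'' : ∀ u ∈ (ws₁ ++ w :: ws₂), '$' ∉ u ∧ u ≠ [] := by
      intro u hu; exact hws u (by simp at hu ⊢; tauto)
    have h₁' : ∀ u ∈ ws₁, ¬ u <+: w ∧ ¬ w <+: u := fun u hu => h₁ u (List.mem_cons_of_mem _ hu)
    exact ih hws'' h₁' (pvR w' m)

-- finite facts about the six field words
theorem pvW_facts : (∀ w ∈ pvFields, '$' ∉ w ∧ w ≠ []) ∧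
    List.Pairwise (fun a b => pvJ a b = false) pvFields ∧
    List.Pairwise (fun a b => ¬ a <+: b ∧ ¬ b <+: a) pvFields := by
  decide

-- pvScan unfolding at '$'
theorem pvScan_dollar (t : List Char) :
    pvScan ('$' :: t) = match pvTryField t with
      | some f => f ++ pvScan (t.drop f.length)
      | none => '$' :: pvScan t := by
  rw [pvScan]; simp

theorem pvScan_cons_ne (c : Char) (t : List Char) (hc : c ≠ '$') :
    pvScan (c :: t) = c :: pvScan t := by
  rw [pvScan]; simp [hc]

-- the main equivalence on lists
theorem pvChain_eq_scan_fuel : ∀ n (l : List Char), l.length ≤ n → pvChain pvFields l = pvScan l := by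
  intro n
  induction n with
  | zero =>
    intro l hl
    have : l = [] := List.length_eq_zero_iff.mp (Nat.le_zero.mp hl)
    subst this
    rw [pvChain_nil, pvScan]
  | succ n ih =>
    intro l hl
    cases l with
    | nil => rw [pvChain_nil, pvScan]
    | cons c t =>
      by_cases hc : c = '$'
      · subst hc
        rcases hfind : pvTryField t with _ | f
        · have hnp : ∀ f ∈ pvFields, ¬ f <+: t := by
            intro f hf hpre
            have := List.find?_eq_none.mp hfind f hf
            simp [List.isPrefixOf_iff_prefix] at this
            exact this hpre
          rw [pvChain_dollar_nomatch pvFields pvW_facts.1 pvW_facts.2.1 t hnp]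
          rw [pvScan_dollar, hfind]
          dsimp only
          rw [ih t (by simp at hl; omega)]
        · obtain ⟨hpf, as, bs, hsplit, hfail⟩ := List.find?_eq_some_iff_append.mp hfind
          obtain ⟨m, rfl⟩ := List.isPrefixOf_iff_prefix.mp hpf
          have h₁ : ∀ w' ∈ as, ¬ w' <+: f ∧ ¬ f <+: w' := by
            intro w' hw'
            have hpw := pvW_facts.2.2
            rw [hsplit, List.pairwise_append] at hpw
            exact hpw.2.2 w' hw' f List.mem_cons_self
          have hws : ∀ w' ∈ (as ++ f :: bs), '$' ∉ w' ∧ w' ≠ [] := by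
            intro w' hw'
            exact pvW_facts.1 w' (hsplit ▸ hw')
          have hchain : pvChain pvFields ('$' :: (f ++ m)) = f ++ pvChain pvFields m := by
            rw [hsplit]
            exact pvChain_dollar_match as f bs hws h₁ m
          rw [hchain, pvScan_dollar, hfind]
          dsimp only
          rw [List.drop_left, ih m (by simp at hl; omega)]
      · have hone : '$' ∉ [c] := by
          simp only [List.mem_singleton]
          exact fun h => hc h.symm
        have hchain : pvChain pvFields (c :: t) = c :: pvChain pvFields t := by
          have h2 : (c :: t) = [c] ++ t := rfl
          rw [h2, pvChain_append _ _ _ hone, List.singleton_append]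
        rw [hchain, pvScan_cons_ne c t hc, ih t (by simp at hl; omega)]

theorem pvChain_eq_scan (l : List Char) : pvChain pvFields l = pvScan l :=
  pvChain_eq_scan_fuel l.length l (le_refl _)

theorem pvChain_expand (l : List Char) : pvChain pvFields l =
    pvR "volume".toList (pvR "vwap".toList (pvR "low".toList (pvR "high".toList
      (pvR "open".toList (pvR "close".toList l))))) := rfl

-- ===== VERDICT (by name: the statement is the Claim_ definition above) =====
theorem translate_expression_py_spec : Claim_equal_translate_expression_py := by
  intro e _
  unfold Spec_translate_expression_py translate_expression_py translate_expression_py_alt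
  rw [← pvChain_eq_scan, pvChain_expand]
  simp only [PySem.Str.replace, String.toList_ofList, pvR]
  have c1 : '$' :: "close".toList = "$close".toList := rfl
  have c2 : '$' :: "open".toList = "$open".toList := rfl
  have c3 : '$' :: "high".toList = "$high".toList := rfl
  have c4 : '$' :: "low".toList = "$low".toList := rfl
  have c5 : '$' :: "vwap".toList = "$vwap".toList := rfl
  have c6 : '$' :: "volume".toList = "$volume".toList := rfl
  rw [c1, c2, c3, c4, c5, c6]
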